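-- pv_equiv track=rewrite | github.com/HopeCheung/leetcode | algorithms/数组分段和最大值最小问题.py | upper_band
-- ===== SOURCE A (Python) =====
-- def require(A, n, max_num):
--     num, total = 1, 0
--     for i in range(n):
--         total = total + A[i]
--         if total > max_num:
--             total = A[i]
--             num = num + 1
--     return num
--
-- def upper_band(A, n, k):
--     low = max(A)
--     high = sum(A)
--     while low < high:
--         mid = (low + high) // 2
--         result = require(A, n, mid)
--         if result > k:
--             low = mid + 1
--         else:
--             high = mid
--     return low
-- ===== SOURCE B (Python) =====
-- def upper_band(A, n, k):
--     prefix = A[:n] if n > 0 else []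
--
--     def parts(cap):
--         count, rest = 0, prefix
--         while rest:
--             take, s = 0, 0
--             for x in rest:
--                 s += x
--                 if s > cap:
--                     break
--                 take += 1
--             rest = rest[max(take, 1):]
--             count += 1
--         return max(count, 1)
--
--     def solve(lo, hi):
--         if lo >= hi:
--             return lo
--         mid = (lo + hi) // 2
--         if parts(mid) > k:
--             return solve(mid + 1, hi)
--         return solve(lo, mid)
--
--     return solve(max(A), sum(A))
-- ===== Notes on version B (the rewrite author's own statement) =====
-- stated objective: alternative
-- what changed: The greedy part-count (A's indexed range(n) loop carrying a counter and a running total with resets) is recomputed by repeatedly chopping the maximal cap-bounded prefix off the materialised prefix list and counting the chops, and the answer-defining bisection (kept because the count is not monotone in the cap for lists with negative entries, making the search result path-dependent) becomes a recursion on the interval instead of a while loop.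
import Mathlib
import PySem

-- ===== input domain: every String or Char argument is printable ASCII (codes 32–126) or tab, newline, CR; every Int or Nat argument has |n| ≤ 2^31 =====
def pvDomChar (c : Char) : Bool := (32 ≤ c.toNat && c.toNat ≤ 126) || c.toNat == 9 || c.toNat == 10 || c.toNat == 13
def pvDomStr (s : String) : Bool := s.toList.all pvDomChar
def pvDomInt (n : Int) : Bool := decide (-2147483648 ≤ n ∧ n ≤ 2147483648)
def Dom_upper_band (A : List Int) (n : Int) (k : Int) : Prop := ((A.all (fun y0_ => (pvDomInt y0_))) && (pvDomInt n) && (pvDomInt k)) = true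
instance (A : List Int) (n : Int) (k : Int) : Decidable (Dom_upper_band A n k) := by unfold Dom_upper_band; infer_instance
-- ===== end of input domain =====

-- B keeps the answer-defining bisection (the greedy part-count is not monotone in the cap when A has
-- negative entries, so the bisection's path-dependent result cannot be obtained by any other search)
-- but computes the predicate by a different algorithm: instead of A's indexed fold carrying a
-- (counter, running-total) pair with resets, B repeatedly CHOPS the maximal cap-bounded prefix off the
-- remaining list and counts the chops; the bisection is a recursion on the interval, not a while loop
-- (objective: alternative decomposition, same cost).

-- ===== PORT A =====
-- require: state (num, total); A[i] via pyGetD (the IndexError case is excluded by Pre_)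
def requireA (A : List Int) (n : Int) (max_num : Int) : Int :=
  ((PySem.List.pyRange 0 n 1).foldl
    (fun (st : Int × Int) i =>
      let total := st.2 + PySem.List.pyGetD A i 0
      if total > max_num then (st.1 + 1, PySem.List.pyGetD A i 0) else (st.1, total))
    ((1 : Int), (0 : Int))).1

-- the while-loop; fuel only makes it total (the interval shrinks each iteration, so
-- (high - low).toNat + 1 steps always suffice)
def loopA (A : List Int) (n k : Int) (fuel : Nat) (low high : Int) : Int :=
  match fuel with
  | 0 => low
  | fuel + 1 =>
    if low < high then
      let mid := PySem.Int.floordiv (low + high) 2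
      if requireA A n mid > k then loopA A n k fuel (mid + 1) high
      else loopA A n k fuel low mid
    else low

def upper_band (A : List Int) (n : Int) (k : Int) : Int :=
  let low := (PySem.List.max? A (fun x => x)).getD 0
  let high := A.sum
  loopA A n k ((high - low).toNat + 1) low high

-- ===== PORT B =====
-- length of the maximal prefix whose running sums stay ≤ cap (Source B's inner for-loop over rest)
def chopLen (cap s : Int) : List Int → Nat
  | [] => 0
  | x :: r => if s + x > cap then 0 else 1 + chopLen cap (s + x) r

-- Source B's while rest: chop the maximal cap-bounded prefix (at least one element) and count the chops
def chopLoop (cap : Int) (count : Int) (rest : List Int) : Int :=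
  match rest with
  | [] => count
  | x :: r => chopLoop cap (count + 1) ((x :: r).drop (max (chopLen cap 0 (x :: r)) 1))
termination_by rest.length
decreasing_by simp only [List.length_drop, List.length_cons]; omega

def partsAlt (cap : Int) (pre : List Int) : Int := max (chopLoop cap 0 pre) 1

-- Source B's solve; fuel only makes it total, as in loopA
def solveB (pre : List Int) (k : Int) (fuel : Nat) (lo hi : Int) : Int :=
  match fuel with
  | 0 => lo
  | fuel + 1 =>
    if lo ≥ hi then lo
    else
      let mid := PySem.Int.floordiv (lo + hi) 2
      if partsAlt mid pre > k then solveB pre k fuel (mid + 1) hi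
      else solveB pre k fuel lo mid

def upper_band_alt (A : List Int) (n : Int) (k : Int) : Int :=
  let pre := if 0 < n then PySem.List.slice A none (some n) else []
  let lo := (PySem.List.max? A (fun x => x)).getD 0
  let hi := A.sum
  solveB pre k ((hi - lo).toNat + 1) lo hi

-- ===== PRECONDITION & SPEC =====
-- Pre_ excludes exactly the inputs on which A raises: empty A (max() ValueError) and inputs where
-- the bisection loop runs (sum(A) > max(A)) with n > len(A), on which require raises IndexError.
def Pre_upper_band (A : List Int) (n : Int) (k : Int) : Prop :=
  A ≠ [] ∧ (n ≤ (A.length : Int) ∨ ∃ x ∈ A, A.sum ≤ x)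
instance (A : List Int) (n : Int) (k : Int) : Decidable (Pre_upper_band A n k) := by
  unfold Pre_upper_band; infer_instance

def pvWitness_upper_band : List Int × Int × Int := ([7, 2, 5, 10, 8], 5, 2)

def Spec_upper_band (A : List Int) (n : Int) (k : Int) (out : Int) : Prop := out = upper_band_alt A n k
instance (A : List Int) (n : Int) (k : Int) (out : Int) : Decidable (Spec_upper_band A n k out) := by
  unfold Spec_upper_band; infer_instance

-- ===== CLAIM (what is proved, stated in full; the proofs are below) =====
def Claim_equal_upper_band : Prop := ∀ (A : List Int) (n : Int) (k : Int), Dom_upper_band A n k → Pre_upper_band A n k → Spec_upper_band A n k (upper_band A n k)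

-- ===== LEMMAS AND PROOFS =====

-- A's greedy fold, written as a recursion on the list (num = part counter, s = running total)
def greedyG (cap num s : Int) : List Int → Int
  | [] => num
  | x :: r => if s + x > cap then greedyG cap (num + 1) x r else greedyG cap num (s + x) r

theorem fold_eq_greedyG (cap : Int) : ∀ (L : List Int) (num s : Int),
    (L.foldl (fun (st : Int × Int) x =>
        let total := st.2 + x
        if total > cap then (st.1 + 1, x) else (st.1, total)) (num, s)).1
      = greedyG cap num s L := by
  intro L
  induction L with
  | nil => intro num s; rfl
  | cons x r ih =>
    intro num s
    simp only [List.foldl, greedyG]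
    by_cases h : s + x > cap <;> simp [h, ih]

theorem chopLen_le (cap : Int) : ∀ (L : List Int) (s : Int), chopLen cap s L ≤ L.length := by
  intro L
  induction L with
  | nil => intro s; simp [chopLen]
  | cons x r ih =>
    intro s
    simp only [chopLen, List.length_cons]
    split_ifs
    · omega
    · have := ih (s + x); omega

theorem greedyG_chop (cap : Int) : ∀ (L : List Int) (s num : Int), (∀ x ∈ L, x ≤ cap) →
    greedyG cap num s L =
      if chopLen cap s L = L.length then num
      else greedyG cap (num + 1) 0 (L.drop (chopLen cap s L)) := by
  intro L
  induction L with
  | nil => intro s num _; simp [chopLen, greedyG]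
  | cons x r ih =>
    intro s num hx
    by_cases h : s + x > cap
    · have hx0 : x ≤ cap := hx x (by simp)
      simp only [greedyG, chopLen, if_pos h, List.length_cons]
      rw [if_neg (by omega), List.drop_zero]
      simp only [greedyG]
      rw [if_neg (by omega)]
      simp
    · simp only [greedyG, chopLen, if_neg h, List.length_cons]
      rw [ih (s + x) num (fun y hy => hx y (by simp [hy]))]
      have hle := chopLen_le cap r (s + x)
      by_cases hlen : chopLen cap (s + x) r = r.length
      · rw [if_pos hlen, if_pos (by omega)]
      · rw [if_neg hlen, if_neg (by omega)]
        have h1 : 1 + chopLen cap (s + x) r = chopLen cap (s + x) r + 1 := by omega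
        rw [h1, List.drop_succ_cons]

theorem chopLoop_acc (cap : Int) : ∀ (m : Nat) (R : List Int) (c : Int), R.length ≤ m →
    chopLoop cap c R = c + chopLoop cap 0 R := by
  intro m
  induction m with
  | zero =>
    intro R c h
    match R, h with
    | [], _ => simp [chopLoop.eq_def]
  | succ m ih =>
    intro R c h
    match R with
    | [] => simp [chopLoop.eq_def]
    | x :: r =>
      rw [chopLoop.eq_def, chopLoop.eq_def]
      simp only []
      have hlen : ((x :: r).drop (max (chopLen cap 0 (x :: r)) 1)).length ≤ m := by
        simp only [List.length_drop, List.length_cons] at *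
        omega
      rw [ih _ (c + 1) hlen, ih _ ((0 : Int) + 1) hlen]
      omega

theorem chopLoop_nonneg (cap : Int) : ∀ (m : Nat) (R : List Int), R.length ≤ m →
    0 ≤ chopLoop cap 0 R := by
  intro m
  induction m with
  | zero =>
    intro R h
    match R, h with
    | [], _ => simp [chopLoop.eq_def]
  | succ m ih =>
    intro R h
    match R with
    | [] => simp [chopLoop.eq_def]
    | x :: r =>
      rw [chopLoop.eq_def]
      simp only []
      have hlen : ((x :: r).drop (max (chopLen cap 0 (x :: r)) 1)).length ≤ m := by
        simp only [List.length_drop, List.length_cons] at *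
        omega
      rw [chopLoop_acc cap m _ _ hlen]
      have := ih _ hlen
      omega

-- the central bridge: A's greedy counter = B's chop count (all elements ≤ cap)
theorem greedyG_eq_chop (cap : Int) : ∀ (m : Nat) (L : List Int) (num : Int), L.length ≤ m →
    (∀ x ∈ L, x ≤ cap) → greedyG cap num 0 L = num - 1 + max (chopLoop cap 0 L) 1 := by
  intro m
  induction m with
  | zero =>
    intro L num h _
    match L, h with
    | [], _ => simp [greedyG, chopLoop.eq_def]
  | succ m ih =>
    intro L num h hx
    match L with
    | [] => simp [greedyG, chopLoop.eq_def]
    | x :: r =>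
      have hx0 : x ≤ cap := hx x (by simp)
      have hchop1 : 1 ≤ chopLen cap 0 (x :: r) := by
        simp only [chopLen]
        rw [if_neg (by omega)]
        omega
      have hle := chopLen_le cap (x :: r) 0
      have hmax : max (chopLen cap 0 (x :: r)) 1 = chopLen cap 0 (x :: r) := by omega
      have hloop : chopLoop cap 0 (x :: r)
          = 1 + chopLoop cap 0 ((x :: r).drop (chopLen cap 0 (x :: r))) := by
        rw [chopLoop.eq_def]
        simp only []
        rw [hmax, chopLoop_acc cap m _ _
          (by simp only [List.length_drop, List.length_cons] at *; omega)]
        omega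
      rw [greedyG_chop cap (x :: r) 0 num hx]
      by_cases hlen : chopLen cap 0 (x :: r) = (x :: r).length
      · rw [if_pos hlen]
        have hnil : (x :: r).drop (chopLen cap 0 (x :: r)) = [] := by
          rw [List.drop_eq_nil_iff]
          omega
        have h0 : chopLoop cap 0 ([] : List Int) = 0 := by simp [chopLoop.eq_def]
        rw [hnil, h0] at hloop
        omega
      · rw [if_neg hlen]
        have hdlen : ((x :: r).drop (chopLen cap 0 (x :: r))).length ≤ m := by
          simp only [List.length_drop, List.length_cons] at *
          omega
        have hdx : ∀ y ∈ (x :: r).drop (chopLen cap 0 (x :: r)), y ≤ cap :=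
          fun y hy => hx y (List.mem_of_mem_drop hy)
        rw [ih _ (num + 1) hdlen hdx]
        have hne : (x :: r).drop (chopLen cap 0 (x :: r)) ≠ [] := by
          rw [ne_eq, List.drop_eq_nil_iff]
          simp only [List.length_cons] at *
          omega
        have hge1 : 1 ≤ chopLoop cap 0 ((x :: r).drop (chopLen cap 0 (x :: r))) := by
          match hd : (x :: r).drop (chopLen cap 0 (x :: r)) with
          | [] => exact absurd hd hne
          | y :: t =>
            have ht : (y :: t).length ≤ m := by rw [← hd]; exact hdlen
            rw [chopLoop.eq_def]
            simp only []
            have hlen2 : ((y :: t).drop (max (chopLen cap 0 (y :: t)) 1)).length ≤ m := by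
              simp only [List.length_drop, List.length_cons] at *
              omega
            rw [chopLoop_acc cap m _ _ hlen2]
            have := chopLoop_nonneg cap m _ hlen2
            omega
        omega

theorem greedyG_eq_parts (cap : Int) (m : Nat) (L : List Int) (h : L.length ≤ m)
    (hx : ∀ x ∈ L, x ≤ cap) : greedyG cap 1 0 L = partsAlt cap L := by
  rw [greedyG_eq_chop cap m L 1 h hx]
  simp [partsAlt]

-- A's require equals B's parts on the materialised prefix, for caps at least every prefix element
theorem req_eq_parts (A : List Int) (n : Int) (hn : n ≤ (A.length : Int)) (m : Int)
    (hcap : ∀ x ∈ A.take (max 0 n).toNat, x ≤ m) :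
    requireA A n m = partsAlt m (if 0 < n then PySem.List.slice A none (some n) else []) := by
  by_cases hpos : 0 < n
  · rw [if_pos hpos, PySem.List.slice_to A (by omega)]
    have htake : A.take n.toNat = A.take (max 0 n).toNat := by
      congr 1
      omega
    rw [htake]
    have hlen : (((A.take (max 0 n).toNat).length) : Int) = n := by
      simp [List.length_take]; omega
    have hrange : PySem.List.pyRange 0 n 1
        = PySem.List.pyRange 0 ((A.take (max 0 n).toNat).length : Int) 1 := by rw [hlen]
    unfold requireA
    rw [hrange]
    rw [PySem.List.foldl_congr_mem _ _
      (fun (st : Int × Int) i =>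
        let total := st.2 + PySem.List.pyGetD (A.take (max 0 n).toNat) i 0
        if total > m then (st.1 + 1, PySem.List.pyGetD (A.take (max 0 n).toNat) i 0)
        else (st.1, total)) _ ?_]
    · rw [PySem.List.foldl_pyRange_zero_pyGetD' (A.take (max 0 n).toNat) 0
        (fun (st : Int × Int) x =>
          let total := st.2 + x
          if total > m then (st.1 + 1, x) else (st.1, total)) ((1:Int),(0:Int))]
      rw [fold_eq_greedyG]
      exact greedyG_eq_parts m (A.take (max 0 n).toNat).length _ le_rfl hcap
    · intro st i hi
      rw [PySem.List.mem_pyRange_one] at hi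
      have hx : PySem.List.pyGetD A i 0 = PySem.List.pyGetD (A.take (max 0 n).toNat) i 0 := by
        rw [PySem.List.pyGetD_eq_getElem A 0 hi.1 (by omega),
            PySem.List.pyGetD_eq_getElem (A.take (max 0 n).toNat) 0 hi.1 hi.2]
        simp [List.getElem_take]
      dsimp only
      rw [hx]
  · rw [if_neg hpos]
    simp [requireA, partsAlt, chopLoop.eq_def, PySem.List.pyRange_one_eq_nil (show n ≤ (0:Int) by omega)]

theorem pv_mid_bounds {low high : Int} (h : low < high) :
    low ≤ PySem.Int.floordiv (low + high) 2 ∧ PySem.Int.floordiv (low + high) 2 < high := by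
  refine ⟨(PySem.Int.floordiv_two_mid_bounds (le_of_lt h)).1, ?_⟩
  rw [PySem.Int.floordiv_lt_iff_lt_mul (by omega)]
  omega

theorem loops_eq (A : List Int) (pre : List Int) (n k b : Int)
    (hreq : ∀ m, b ≤ m → requireA A n m = partsAlt m pre) :
    ∀ (fa fb : Nat) (lo hi : Int), b ≤ lo → (hi - lo).toNat < fa → (hi - lo).toNat < fb →
      loopA A n k fa lo hi = solveB pre k fb lo hi := by
  intro fa
  induction fa with
  | zero => intro fb lo hi _ hfa; omega
  | succ fa ih =>
    intro fb lo hi hb hfa hfb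
    match fb, hfb with
    | fb + 1, _ =>
      simp only [loopA, solveB]
      by_cases hlt : lo < hi
      · have hm := pv_mid_bounds hlt
        simp only [hlt, if_true, show ¬ lo ≥ hi by omega, if_false,
          hreq (PySem.Int.floordiv (lo + hi) 2) (by omega)]
        split_ifs
        · exact ih _ _ _ (by omega) (by omega) (by omega)
        · exact ih _ _ _ hb (by omega) (by omega)
      · simp [hlt, show lo ≥ hi by omega]

theorem upper_band_spec : Claim_equal_upper_band := by
  intro A n k _ hpre
  unfold Spec_upper_band upper_band upper_band_alt
  obtain ⟨hne, hor⟩ := hpre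
  cases hmax : PySem.List.max? A (fun x => x) with
  | none => exact absurd ((PySem.List.max?_eq_none_iff A _).mp hmax) hne
  | some mx =>
    simp only [Option.getD_some]
    rcases hor with hn | ⟨x, hx, hsx⟩
    · refine loops_eq A _ n k mx (fun m hm => req_eq_parts A n hn m ?_) _ _ _ _ le_rfl (by omega) (by omega)
      intro y hy
      have : y ≤ mx := PySem.List.max?_isMax hmax y (List.mem_of_mem_take hy)
      omega
    · have hub : x ≤ mx := PySem.List.max?_isMax hmax x hx
      simp [loopA, solveB, show ¬ mx < A.sum by omega, show mx ≥ A.sum by omega]
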